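-- pv_equiv track=rewrite | github.com/daniel-reich/ubiquitous-fiesta | 2hvruws6kgiKj98Rv_22.py | to_scottish_screaming
-- ===== SOURCE A (Python) =====
-- def to_scottish_screaming(txt):
--   d = dict()
--   d['a'] = 'E'
--   d['e'] = 'E'
--   d['i'] = 'E'
--   d['o'] = 'E'
--   d['u'] = 'E'
--   s = ""
--   ss = list(txt.strip())
--   for elem in ss:
--     if(elem.isalpha()):
--       k = elem.lower()
--       if(k in d):
--         s += d[k]
--       else:
--         s += k.upper()
--     else:
--       s += elem
--   return s
-- ===== SOURCE B (Python) =====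
-- def to_scottish_screaming(txt):
--   s = txt.strip().upper()
--   for v in "AEIOU":
--     s = s.replace(v, "E")
--   return s
-- ===== Notes on version B (the rewrite author's own statement) =====
-- stated objective: idiomatic
-- what changed: B replaces A's single per-character loop (isalpha test, dict lookup, string += accumulation) with staged whole-string library passes: one strip().upper() pass followed by five str.replace passes, one per vowel.
import Mathlib
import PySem

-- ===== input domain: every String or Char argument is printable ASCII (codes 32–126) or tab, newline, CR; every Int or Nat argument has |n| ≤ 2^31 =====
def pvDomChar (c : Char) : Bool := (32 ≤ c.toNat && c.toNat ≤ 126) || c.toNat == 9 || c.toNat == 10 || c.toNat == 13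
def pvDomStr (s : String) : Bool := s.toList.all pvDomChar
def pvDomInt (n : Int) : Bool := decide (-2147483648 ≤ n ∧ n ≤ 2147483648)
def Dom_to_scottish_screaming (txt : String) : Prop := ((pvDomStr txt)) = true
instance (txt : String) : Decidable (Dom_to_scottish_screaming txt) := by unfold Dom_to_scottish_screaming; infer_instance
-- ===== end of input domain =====

-- B replaces A's per-character loop (isalpha test, dict lookup, += accumulation) with staged
-- whole-string passes: strip().upper() once, then one str.replace pass per vowel.

-- ===== PORT A =====
def to_scottish_screaming (txt : String) : String :=
  let d : PySem.Dict Char String :=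
    (((((PySem.Dict.empty.insert 'a' "E").insert 'e' "E").insert 'i' "E").insert 'o' "E").insert 'u' "E")
  let ss := (PySem.Str.strip txt).toList
  let s := ss.foldl (fun s elem =>
    if PySem.Chars.isalpha elem then
      let k := PySem.Chars.lowerChar elem
      if d.contains k then
        s ++ (d.getD k "").toList
      else
        s ++ [PySem.Chars.upperChar k]
    else s ++ [elem]) ([] : List Char)
  String.ofList s

-- ===== PORT B =====
def to_scottish_screaming_alt (txt : String) : String :=
  "AEIOU".toList.foldl (fun s v => PySem.Str.replace s (String.ofList [v]) "E")
    (PySem.Str.upper (PySem.Str.strip txt))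

-- ===== PRECONDITION & SPEC =====
def Spec_to_scottish_screaming (txt : String) (out : String) : Prop := out = to_scottish_screaming_alt txt
instance (txt : String) (out : String) : Decidable (Spec_to_scottish_screaming txt out) := by unfold Spec_to_scottish_screaming; infer_instance

-- ===== CLAIM (what is proved, stated in full; the proofs are below) =====
def Claim_equal_to_scottish_screaming : Prop := ∀ (txt : String), Dom_to_scottish_screaming txt → Spec_to_scottish_screaming txt (to_scottish_screaming txt)

-- ===== LEMMAS AND PROOFS =====

-- A's per-character emission, as a function Char → List Char
def pvStepA (elem : Char) : List Char :=
  let d : PySem.Dict Char String :=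
    (((((PySem.Dict.empty.insert 'a' "E").insert 'e' "E").insert 'i' "E").insert 'o' "E").insert 'u' "E")
  if PySem.Chars.isalpha elem then
    let k := PySem.Chars.lowerChar elem
    if d.contains k then (d.getD k "").toList
    else [PySem.Chars.upperChar k]
  else [elem]

-- the per-character effect of the five chained replaces
def pvSubst (c : Char) : Char :=
  if c = 'A' ∨ c = 'E' ∨ c = 'I' ∨ c = 'O' ∨ c = 'U' then 'E' else c

theorem pvFoldA (l acc : List Char) :
    (l.foldl (fun s elem =>
      if PySem.Chars.isalpha elem then
        let k := PySem.Chars.lowerChar elem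
        if ((((((PySem.Dict.empty : PySem.Dict Char String).insert 'a' "E").insert 'e' "E").insert 'i' "E").insert 'o' "E").insert 'u' "E").contains k then
          s ++ (((((((PySem.Dict.empty : PySem.Dict Char String).insert 'a' "E").insert 'e' "E").insert 'i' "E").insert 'o' "E").insert 'u' "E").getD k "").toList
        else
          s ++ [PySem.Chars.upperChar k]
      else s ++ [elem]) acc) = acc ++ l.flatMap pvStepA := by
  induction l generalizing acc with
  | nil => simp
  | cons c tl ih =>
    simp only [List.foldl_cons, List.flatMap_cons, ih, pvStepA]
    split_ifs <;> simp

-- replace with a single-char pattern is a pointwise substitution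
theorem pvReplaceGoSingle (a b : Char) (fuel : Nat) :
    ∀ (l acc : List Char), l.length ≤ fuel →
      PySem.Chars.replace.go [a] [b] fuel l acc
        = acc.reverse ++ l.map (fun c => if c = a then b else c) := by
  induction fuel with
  | zero =>
    intro l acc h
    have : l = [] := List.eq_nil_of_length_eq_zero (Nat.le_zero.mp h)
    subst this; simp [PySem.Chars.replace.go]
  | succ n ih =>
    intro l acc h
    cases l with
    | nil => simp [PySem.Chars.replace.go]
    | cons c t =>
      rw [PySem.Chars.replace.go]
      by_cases hc : c = a
      · subst hc
        have hp : [c].isPrefixOf (c :: t) = true := by simp [List.isPrefixOf]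
        simp only [hp, if_true, List.length_singleton, List.drop_succ_cons, List.drop_zero,
          List.reverse_singleton, List.singleton_append]
        rw [ih t (b :: acc) (by simp at h; omega)]
        simp
      · have hp : [a].isPrefixOf (c :: t) = false := by
          simp [List.isPrefixOf]; exact fun h' => (hc h'.symm).elim
        simp only [hp, Bool.false_eq_true, if_neg, hc]
        rw [if_neg (by simp [hc]), ih t _ (by simpa using Nat.le_of_succ_le_succ h)]
        simp [hc]

theorem pvReplaceSingle (a b : Char) (l : List Char) :
    PySem.Chars.replace l [a] [b] = l.map (fun c => if c = a then b else c) := by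
  rw [PySem.Chars.replace]
  simp only [List.isEmpty_cons, Bool.false_eq_true, if_neg]
  rw [if_neg (by simp)]
  exact pvReplaceGoSingle a b l.length l [] (le_refl _)

-- per-character agreement on the domain, by enumeration over the codes < 127
theorem pvCharAll :
    ((List.range 127).all (fun n =>
      pvStepA (Char.ofNat n) == [pvSubst (PySem.Chars.upperChar (Char.ofNat n))])) = true := by
  decide

theorem pvCharAgree (c : Char) (hc : pvDomChar c = true) :
    pvStepA c = [pvSubst (PySem.Chars.upperChar c)] := by
  have hlt : c.toNat < 127 := by
    unfold pvDomChar at hc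
    simp only [Bool.or_eq_true, Bool.and_eq_true, decide_eq_true_eq, beq_iff_eq] at hc
    omega
  have h := List.all_eq_true.mp pvCharAll c.toNat (List.mem_range.mpr hlt)
  rwa [Char.ofNat_toNat, beq_iff_eq] at h

theorem pvMemStrip (l : List Char) (c : Char) (hc : c ∈ PySem.Chars.strip l) : c ∈ l := by
  simp only [PySem.Chars.strip, PySem.Chars.lstrip, PySem.Chars.rstrip, List.mem_reverse] at hc
  have h1 : c ∈ (List.dropWhile PySem.Chars.isspace l).reverse := (List.dropWhile_sublist _).mem hc
  have h2 : c ∈ List.dropWhile PySem.Chars.isspace l := List.mem_reverse.mp h1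
  exact (List.dropWhile_sublist _).mem h2

theorem pvFlatAgree (L : List Char) (h : ∀ c ∈ L, pvDomChar c = true) :
    L.flatMap pvStepA = L.map (fun c => pvSubst (PySem.Chars.upperChar c)) := by
  induction L with
  | nil => rfl
  | cons c tl ih =>
    simp only [List.flatMap_cons, List.map_cons]
    rw [pvCharAgree c (h c (by simp)), ih (fun x hx => h x (by simp [hx]))]
    simp

-- the composition of the five single-char substitutions is pvSubst
theorem pvChainSubst (c : Char) :
    (if (if (if (if (if c = 'A' then 'E' else c) = 'E' then 'E' else (if c = 'A' then 'E' else c)) = 'I' then 'E'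
         else (if (if c = 'A' then 'E' else c) = 'E' then 'E' else (if c = 'A' then 'E' else c))) = 'O' then 'E'
        else (if (if (if c = 'A' then 'E' else c) = 'E' then 'E' else (if c = 'A' then 'E' else c)) = 'I' then 'E'
         else (if (if c = 'A' then 'E' else c) = 'E' then 'E' else (if c = 'A' then 'E' else c)))) = 'U' then 'E'
       else (if (if (if (if c = 'A' then 'E' else c) = 'E' then 'E' else (if c = 'A' then 'E' else c)) = 'I' then 'E'
         else (if (if c = 'A' then 'E' else c) = 'E' then 'E' else (if c = 'A' then 'E' else c))) = 'O' then 'E'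
        else (if (if (if c = 'A' then 'E' else c) = 'E' then 'E' else (if c = 'A' then 'E' else c)) = 'I' then 'E'
         else (if (if c = 'A' then 'E' else c) = 'E' then 'E' else (if c = 'A' then 'E' else c)))))
      = pvSubst c := by
  unfold pvSubst
  split_ifs <;> simp_all

-- B's value, reduced to one map over the uppercased stripped characters
theorem pvAltChar (txt : String) :
    (to_scottish_screaming_alt txt).toList
      = (PySem.Chars.strip txt.toList).map (fun c => pvSubst (PySem.Chars.upperChar c)) := by
  unfold to_scottish_screaming_alt
  simp only [show "AEIOU".toList = ['A','E','I','O','U'] from rfl, List.foldl_cons, List.foldl_nil]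
  simp only [PySem.Str.toList_replace, show (String.ofList ['A']).toList = ['A'] from rfl,
    show (String.ofList ['E']).toList = ['E'] from rfl, show (String.ofList ['I']).toList = ['I'] from rfl,
    show (String.ofList ['O']).toList = ['O'] from rfl, show (String.ofList ['U']).toList = ['U'] from rfl,
    PySem.Str.toList_upper, PySem.Str.toList_strip,
    pvReplaceSingle, List.map_map, PySem.Chars.upper]
  apply List.map_congr_left
  intro c _
  simp only [Function.comp_apply]
  exact pvChainSubst (PySem.Chars.upperChar c)

-- ===== VERDICT (by name: the statement is the Claim_ definition above) =====

theorem to_scottish_screaming_spec : Claim_equal_to_scottish_screaming := by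
  intro txt hdom
  have hsub : ∀ c ∈ (PySem.Chars.strip txt.toList), pvDomChar c = true := by
    intro c hc
    exact List.all_eq_true.mp hdom c (pvMemStrip _ c hc)
  show to_scottish_screaming txt = to_scottish_screaming_alt txt
  have hA : (to_scottish_screaming txt).toList
      = (PySem.Chars.strip txt.toList).flatMap pvStepA := by
    simp only [to_scottish_screaming, pvFoldA, PySem.Str.toList_strip]
    simp
  apply String.toList_inj.mp
  rw [hA, pvAltChar txt]
  exact pvFlatAgree _ hsub
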